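-- pv_equiv track=rewrite | github.com/novetronsa-spec/vectort.io | backend/ai_generators/enhanced_generator.py | _group_files_by_priority
-- ===== SOURCE A (Python) =====
-- from typing import Dict, List, Optional
--
-- def _group_files_by_priority(files: Dict[str, str]) -> Dict[int, Dict[str, str]]:
--     """Groupe les fichiers par priorité de génération"""
--
--     priority_groups = {
--         1: {},  # Configuration (package.json, etc.)
--         2: {},  # Core files (main, app)
--         3: {},  # Components
--         4: {},  # Pages/Routes
--         5: {},  # Utils/Helpers
--         6: {},  # Documentation
--     }
--
--     for file_path, desc in files.items():
--         if any(x in file_path for x in ["package.json", "requirements.txt", "config"]):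
--             priority_groups[1][file_path] = desc
--         elif any(x in file_path for x in ["main.", "app.", "server.", "index."]):
--             priority_groups[2][file_path] = desc
--         elif "component" in file_path.lower():
--             priority_groups[3][file_path] = desc
--         elif any(x in file_path for x in ["page", "route", "view"]):
--             priority_groups[4][file_path] = desc
--         elif any(x in file_path for x in ["util", "helper", "lib"]):
--             priority_groups[5][file_path] = desc
--         else:
--             priority_groups[6][file_path] = desc
--
--     return priority_groups
-- ===== SOURCE B (Python) =====
-- # B: staged partition — five successive passes over a shrinking "remaining" list, each pass
-- # extracting its priority bucket and leaving the rest; leftovers become bucket 6.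
-- # (Only the 'component' rule matches case-insensitively, as in the original.)
-- KEYWORDS = [
--     (["package.json", "requirements.txt", "config"], False),
--     (["main.", "app.", "server.", "index."], False),
--     (["component"], True),
--     (["page", "route", "view"], False),
--     (["util", "helper", "lib"], False),
-- ]
--
-- def _group_files_by_priority(files):
--     groups = {}
--     remaining = list(files.items())
--     for prio, (kws, ci) in enumerate(KEYWORDS, start=1):
--         matched = {}
--         rest = []
--         for fp, desc in remaining:
--             hay = fp.lower() if ci else fp
--             if any(k in hay for k in kws):
--                 matched[fp] = desc
--             else:
--                 rest.append((fp, desc))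
--         groups[prio] = matched
--         remaining = rest
--     groups[6] = dict(remaining)
--     return groups
-- ===== Notes on version B (the rewrite author's own statement) =====
-- stated objective: alternative
-- what changed: Replaces A's per-file if/elif cascade (one pass, six-way branch per entry) by a staged partition: five successive passes over a shrinking remaining list, each pass extracting one priority bucket, with leftovers forming bucket 6.
import Mathlib
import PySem

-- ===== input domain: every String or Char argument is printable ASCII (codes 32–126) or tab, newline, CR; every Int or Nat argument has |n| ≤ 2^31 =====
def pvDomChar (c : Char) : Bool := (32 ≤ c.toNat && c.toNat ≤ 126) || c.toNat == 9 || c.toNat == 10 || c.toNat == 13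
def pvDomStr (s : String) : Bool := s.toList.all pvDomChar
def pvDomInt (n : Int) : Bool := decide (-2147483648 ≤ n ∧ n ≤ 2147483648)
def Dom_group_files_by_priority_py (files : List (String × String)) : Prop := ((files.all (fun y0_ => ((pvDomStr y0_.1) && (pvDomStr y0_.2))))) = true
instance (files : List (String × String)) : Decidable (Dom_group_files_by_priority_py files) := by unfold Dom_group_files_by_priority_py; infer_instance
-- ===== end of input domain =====

-- B replaces A's per-file if/elif cascade by a staged partition: five successive passes over a
-- shrinking remaining list, each extracting one priority bucket, leftovers = bucket 6 (alternative decomposition).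

-- ===== PORT A =====
-- initial dict {1:{},…,6:{}}
def pvInitGroups : PySem.Dict Int (PySem.Dict String String) :=
  ((((((PySem.Dict.empty.insert 1 PySem.Dict.empty).insert 2 PySem.Dict.empty).insert 3
      PySem.Dict.empty).insert 4 PySem.Dict.empty).insert 5 PySem.Dict.empty).insert 6 PySem.Dict.empty)

-- loop body of A: the if/elif chain, priority_groups[p][file_path] = desc
def pvAStep (st : PySem.Dict Int (PySem.Dict String String)) (e : String × String) :
    PySem.Dict Int (PySem.Dict String String) :=
  let fp := e.1; let desc := e.2
  if (["package.json", "requirements.txt", "config"].any (fun x => PySem.Str.isIn x fp)) then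
    st.modify 1 PySem.Dict.empty (fun d => d.insert fp desc)
  else if (["main.", "app.", "server.", "index."].any (fun x => PySem.Str.isIn x fp)) then
    st.modify 2 PySem.Dict.empty (fun d => d.insert fp desc)
  else if PySem.Str.isIn "component" (PySem.Str.lower fp) then
    st.modify 3 PySem.Dict.empty (fun d => d.insert fp desc)
  else if (["page", "route", "view"].any (fun x => PySem.Str.isIn x fp)) then
    st.modify 4 PySem.Dict.empty (fun d => d.insert fp desc)
  else if (["util", "helper", "lib"].any (fun x => PySem.Str.isIn x fp)) then
    st.modify 5 PySem.Dict.empty (fun d => d.insert fp desc)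
  else
    st.modify 6 PySem.Dict.empty (fun d => d.insert fp desc)

def group_files_by_priority_py (files : List (String × String)) :
    List (Int × List (String × String)) :=
  ((files.foldl pvAStep pvInitGroups).items).map (fun p => (p.1, p.2.items))

-- ===== PORT B =====
-- hay = fp.lower() if ci else fp; any(k in hay for k in kws)
def pvHit (kws : List String) (ci : Bool) (fp : String) : Bool :=
  let hay := if ci then PySem.Str.lower fp else fp
  kws.any (fun k => PySem.Str.isIn k hay)

-- one pass of B's inner loop: split 'remaining' into (matched dict, rest list)
def pvPass (kws : List String) (ci : Bool) (rem : List (String × String)) :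
    PySem.Dict String String × List (String × String) :=
  rem.foldl
    (fun acc e =>
      if pvHit kws ci e.1 then (acc.1.insert e.1 e.2, acc.2)
      else (acc.1, acc.2 ++ [e]))
    (PySem.Dict.empty, [])

def group_files_by_priority_py_alt (files : List (String × String)) :
    List (Int × List (String × String)) :=
  let p1 := pvPass ["package.json", "requirements.txt", "config"] false files
  let p2 := pvPass ["main.", "app.", "server.", "index."] false p1.2
  let p3 := pvPass ["component"] true p2.2
  let p4 := pvPass ["page", "route", "view"] false p3.2
  let p5 := pvPass ["util", "helper", "lib"] false p4.2
  [(1, p1.1.items), (2, p2.1.items), (3, p3.1.items), (4, p4.1.items), (5, p5.1.items),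
   (6, (PySem.Dict.ofList p5.2).items)]

-- ===== PRECONDITION & SPEC =====
def Spec_group_files_by_priority_py (files : List (String × String)) (out : List (Int × List (String × String))) : Prop := out = group_files_by_priority_py_alt files
instance (files : List (String × String)) (out : List (Int × List (String × String))) : Decidable (Spec_group_files_by_priority_py files out) := by unfold Spec_group_files_by_priority_py; infer_instance

-- ===== CLAIM =====
def Claim_equal_group_files_by_priority_py : Prop := ∀ (files : List (String × String)), Dom_group_files_by_priority_py files → Spec_group_files_by_priority_py files (group_files_by_priority_py files)

-- ===== LEMMAS AND PROOFS =====

-- the six-bucket state of A's loop, as a literal dict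
def pvMkSt (d1 d2 d3 d4 d5 d6 : PySem.Dict String String) :
    PySem.Dict Int (PySem.Dict String String) :=
  PySem.Dict.mk [(1, d1), (2, d2), (3, d3), (4, d4), (5, d5), (6, d6)]

-- insert a list of pairs into a dict (Python's dict(...) update loop)
def pvIns (d : PySem.Dict String String) (l : List (String × String)) :
    PySem.Dict String String :=
  l.foldl (fun d e => d.insert e.1 e.2) d

-- abbreviations for A's five tests (matching pvHit on each rule)
def pvQ1 (e : String × String) : Bool := pvHit ["package.json", "requirements.txt", "config"] false e.1
def pvQ2 (e : String × String) : Bool := pvHit ["main.", "app.", "server.", "index."] false e.1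
def pvQ3 (e : String × String) : Bool := pvHit ["component"] true e.1
def pvQ4 (e : String × String) : Bool := pvHit ["page", "route", "view"] false e.1
def pvQ5 (e : String × String) : Bool := pvHit ["util", "helper", "lib"] false e.1

-- a pass is a stable partition: matched entries inserted into a dict, the rest kept in order
theorem pvPass_aux (kws : List String) (ci : Bool) (rem : List (String × String))
    (d : PySem.Dict String String) (acc : List (String × String)) :
    rem.foldl
      (fun acc e =>
        if pvHit kws ci e.1 then (acc.1.insert e.1 e.2, acc.2)
        else (acc.1, acc.2 ++ [e]))
      (d, acc)
    = (pvIns d (rem.filter (fun e => pvHit kws ci e.1)),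
       acc ++ rem.filter (fun e => !pvHit kws ci e.1)) := by
  induction rem generalizing d acc with
  | nil => simp [pvIns]
  | cons x l ih =>
    by_cases h : pvHit kws ci x.1 = true <;>
      simp [List.foldl_cons, h, ih, pvIns]

theorem pvPass_eq (kws : List String) (ci : Bool) (rem : List (String × String)) :
    pvPass kws ci rem
    = (pvIns PySem.Dict.empty (rem.filter (fun e => pvHit kws ci e.1)),
       rem.filter (fun e => !pvHit kws ci e.1)) := by
  simpa using pvPass_aux kws ci rem PySem.Dict.empty []

-- A's if/elif chain tests are exactly the pvHit tests
theorem pvAStep_eq (st : PySem.Dict Int (PySem.Dict String String)) (e : String × String) :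
    pvAStep st e =
      (if pvQ1 e then st.modify 1 PySem.Dict.empty (fun d => d.insert e.1 e.2)
       else if pvQ2 e then st.modify 2 PySem.Dict.empty (fun d => d.insert e.1 e.2)
       else if pvQ3 e then st.modify 3 PySem.Dict.empty (fun d => d.insert e.1 e.2)
       else if pvQ4 e then st.modify 4 PySem.Dict.empty (fun d => d.insert e.1 e.2)
       else if pvQ5 e then st.modify 5 PySem.Dict.empty (fun d => d.insert e.1 e.2)
       else st.modify 6 PySem.Dict.empty (fun d => d.insert e.1 e.2)) := by
  simp [pvAStep, pvQ1, pvQ2, pvQ3, pvQ4, pvQ5, pvHit]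

-- modify on the literal six-bucket state hits bucket k in place
theorem pvModify_mkSt (d1 d2 d3 d4 d5 d6 : PySem.Dict String String)
    (f : PySem.Dict String String → PySem.Dict String String) :
    ((pvMkSt d1 d2 d3 d4 d5 d6).modify 1 PySem.Dict.empty f = pvMkSt (f d1) d2 d3 d4 d5 d6) ∧
    ((pvMkSt d1 d2 d3 d4 d5 d6).modify 2 PySem.Dict.empty f = pvMkSt d1 (f d2) d3 d4 d5 d6) ∧
    ((pvMkSt d1 d2 d3 d4 d5 d6).modify 3 PySem.Dict.empty f = pvMkSt d1 d2 (f d3) d4 d5 d6) ∧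
    ((pvMkSt d1 d2 d3 d4 d5 d6).modify 4 PySem.Dict.empty f = pvMkSt d1 d2 d3 (f d4) d5 d6) ∧
    ((pvMkSt d1 d2 d3 d4 d5 d6).modify 5 PySem.Dict.empty f = pvMkSt d1 d2 d3 d4 (f d5) d6) ∧
    ((pvMkSt d1 d2 d3 d4 d5 d6).modify 6 PySem.Dict.empty f = pvMkSt d1 d2 d3 d4 d5 (f d6)) := by
  refine ⟨?_, ?_, ?_, ?_, ?_, ?_⟩ <;>
    simp [pvMkSt, PySem.Dict.modify, PySem.Dict.getD, PySem.Dict.get?, PySem.Dict.insert]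

-- A's whole fold, characterised as the staged nested filters B computes
theorem pvA_fold (l : List (String × String)) (d1 d2 d3 d4 d5 d6 : PySem.Dict String String) :
    l.foldl pvAStep (pvMkSt d1 d2 d3 d4 d5 d6)
    = pvMkSt
        (pvIns d1 (l.filter pvQ1))
        (pvIns d2 ((l.filter (fun e => !pvQ1 e)).filter pvQ2))
        (pvIns d3 (((l.filter (fun e => !pvQ1 e)).filter (fun e => !pvQ2 e)).filter pvQ3))
        (pvIns d4 ((((l.filter (fun e => !pvQ1 e)).filter (fun e => !pvQ2 e)).filter
            (fun e => !pvQ3 e)).filter pvQ4))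
        (pvIns d5 (((((l.filter (fun e => !pvQ1 e)).filter (fun e => !pvQ2 e)).filter
            (fun e => !pvQ3 e)).filter (fun e => !pvQ4 e)).filter pvQ5))
        (pvIns d6 (((((l.filter (fun e => !pvQ1 e)).filter (fun e => !pvQ2 e)).filter
            (fun e => !pvQ3 e)).filter (fun e => !pvQ4 e)).filter (fun e => !pvQ5 e))) := by
  induction l generalizing d1 d2 d3 d4 d5 d6 with
  | nil => simp [pvIns]
  | cons x l ih =>
    rw [List.foldl_cons, pvAStep_eq]
    by_cases h1 : pvQ1 x = true
    · simp only [h1, if_true, (pvModify_mkSt d1 d2 d3 d4 d5 d6 _).1, ih]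
      simp [h1, pvIns]
    · by_cases h2 : pvQ2 x = true
      · simp only [h1, h2, if_true, Bool.false_eq_true, if_false,
          (pvModify_mkSt d1 d2 d3 d4 d5 d6 _).2.1, ih]
        simp [h1, h2, pvIns]
      · by_cases h3 : pvQ3 x = true
        · simp only [h1, h2, h3, if_true, Bool.false_eq_true, if_false,
            (pvModify_mkSt d1 d2 d3 d4 d5 d6 _).2.2.1, ih]
          simp [h1, h2, h3, pvIns]
        · by_cases h4 : pvQ4 x = true
          · simp only [h1, h2, h3, h4, if_true, Bool.false_eq_true, if_false,
              (pvModify_mkSt d1 d2 d3 d4 d5 d6 _).2.2.2.1, ih]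
            simp [h1, h2, h3, h4, pvIns]
          · by_cases h5 : pvQ5 x = true
            · simp only [h1, h2, h3, h4, h5, if_true, Bool.false_eq_true, if_false,
                (pvModify_mkSt d1 d2 d3 d4 d5 d6 _).2.2.2.2.1, ih]
              simp [h1, h2, h3, h4, h5, pvIns]
            · simp only [h1, h2, h3, h4, h5, Bool.false_eq_true, if_false,
                (pvModify_mkSt d1 d2 d3 d4 d5 d6 _).2.2.2.2.2, ih]
              simp [h1, h2, h3, h4, h5, pvIns]

-- ===== VERDICT =====
theorem group_files_by_priority_py_spec : Claim_equal_group_files_by_priority_py := by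
  intro files _
  unfold Spec_group_files_by_priority_py group_files_by_priority_py group_files_by_priority_py_alt
  have hinit : pvInitGroups =
      pvMkSt PySem.Dict.empty PySem.Dict.empty PySem.Dict.empty PySem.Dict.empty
        PySem.Dict.empty PySem.Dict.empty := rfl
  rw [hinit, pvA_fold]
  simp only [pvPass_eq, pvQ1, pvQ2, pvQ3, pvQ4, pvQ5]
  rfl
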